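-- pv_equiv track=rewrite | github.com/Lyx3314844-03/superspider | pyspider/antibot/friction.py | _level_for
-- ===== SOURCE A (Python) =====
-- from typing import Dict, Iterable, List, Mapping, Optional
--
-- def _level_for(status_code: int, signals: List[str]) -> str:
--     if any(signal in signals for signal in ("captcha", "slider-captcha", "auth-required", "request-blocked")):
--         return "high"
--     if status_code in {401, 403, 429}:
--         return "high"
--     if any(signal in signals for signal in ("managed-browser-challenge", "waf-vendor", "risk-control", "js-signature", "fingerprint-required", "empty-or-script-shell")):
--         return "medium"
--     if signals:
--         return "low"
--     return "none"
-- ===== SOURCE B (Python) =====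
-- _PRIO = {
--     "captcha": 3, "slider-captcha": 3, "auth-required": 3, "request-blocked": 3,
--     "managed-browser-challenge": 2, "waf-vendor": 2, "risk-control": 2,
--     "js-signature": 2, "fingerprint-required": 2, "empty-or-script-shell": 2,
-- }
--
-- _NAME = {3: "high", 2: "medium", 1: "low"}
--
-- def _level_for(status_code, signals):
--     rank = 0
--     for s in signals:
--         rank = max(rank, _PRIO.get(s, 1))
--     if status_code in {401, 403, 429}:
--         rank = max(rank, 3)
--     return _NAME.get(rank, "none")
-- ===== Notes on version B (the rewrite author's own statement) =====
-- stated objective: alternative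
-- what changed: Replaced the cascade of early returns with several any()-membership scans by a single pass computing a running maximum priority from a signal->level dict, plus the status contribution, then translating the rank to its name.
import Mathlib
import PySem

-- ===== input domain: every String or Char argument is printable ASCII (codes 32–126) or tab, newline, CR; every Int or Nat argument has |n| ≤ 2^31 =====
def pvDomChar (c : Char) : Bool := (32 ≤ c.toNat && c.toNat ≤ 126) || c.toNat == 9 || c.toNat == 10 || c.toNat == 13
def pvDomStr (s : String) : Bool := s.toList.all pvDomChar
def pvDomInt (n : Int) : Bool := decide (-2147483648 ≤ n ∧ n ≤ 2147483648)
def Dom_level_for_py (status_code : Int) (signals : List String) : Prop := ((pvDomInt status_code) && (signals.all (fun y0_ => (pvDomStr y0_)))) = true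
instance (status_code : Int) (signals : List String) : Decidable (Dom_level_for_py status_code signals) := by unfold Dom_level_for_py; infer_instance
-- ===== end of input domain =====

-- B replaces A's cascade of early-return any()-membership scans by one pass over the signals
-- computing a running maximum priority from a signal→level dict, then naming the rank (alternative decomposition).

-- ===== PORT A =====
def level_for_py (status_code : Int) (signals : List String) : String :=
  if (["captcha", "slider-captcha", "auth-required", "request-blocked"].any
        (fun signal => signals.contains signal)) then "high"
  else if (status_code == 401 || status_code == 403 || status_code == 429) then "high"
  else if (["managed-browser-challenge", "waf-vendor", "risk-control", "js-signature",
            "fingerprint-required", "empty-or-script-shell"].any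
        (fun signal => signals.contains signal)) then "medium"
  else if !signals.isEmpty then "low"
  else "none"

-- ===== PORT B =====
def pvPrio : PySem.Dict String Int :=
  PySem.Dict.mk
    [("captcha", 3), ("slider-captcha", 3), ("auth-required", 3), ("request-blocked", 3),
     ("managed-browser-challenge", 2), ("waf-vendor", 2), ("risk-control", 2),
     ("js-signature", 2), ("fingerprint-required", 2), ("empty-or-script-shell", 2)]

def pvName : PySem.Dict Int String :=
  PySem.Dict.mk [(3, "high"), (2, "medium"), (1, "low")]

def level_for_py_alt (status_code : Int) (signals : List String) : String :=
  let rank := signals.foldl (fun r s => max r (PySem.Dict.getD pvPrio s 1)) 0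
  let rank := if status_code == 401 || status_code == 403 || status_code == 429
              then max rank 3 else rank
  PySem.Dict.getD pvName rank "none"

-- ===== PRECONDITION & SPEC =====
def Spec_level_for_py (status_code : Int) (signals : List String) (out : String) : Prop := out = level_for_py_alt status_code signals
instance (status_code : Int) (signals : List String) (out : String) : Decidable (Spec_level_for_py status_code signals out) := by unfold Spec_level_for_py; infer_instance

-- ===== CLAIM (what is proved, stated in full; the proofs are below) =====
def Claim_equal_level_for_py : Prop := ∀ (status_code : Int) (signals : List String), Dom_level_for_py status_code signals → Spec_level_for_py status_code signals (level_for_py status_code signals)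

-- ===== LEMMAS AND PROOFS =====

-- the priority B's dict assigns to one signal, by the three membership cases
lemma prio_eq (s : String) :
    PySem.Dict.getD pvPrio s 1 =
      (if (["captcha", "slider-captcha", "auth-required", "request-blocked"].contains s) then 3
       else if (["managed-browser-challenge", "waf-vendor", "risk-control", "js-signature",
                 "fingerprint-required", "empty-or-script-shell"].contains s) then 2
       else 1) := by
  by_cases h1 : s = "captcha"; · subst h1; decide
  by_cases h2 : s = "slider-captcha"; · subst h2; decide
  by_cases h3 : s = "auth-required"; · subst h3; decide
  by_cases h4 : s = "request-blocked"; · subst h4; decide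
  by_cases h5 : s = "managed-browser-challenge"; · subst h5; decide
  by_cases h6 : s = "waf-vendor"; · subst h6; decide
  by_cases h7 : s = "risk-control"; · subst h7; decide
  by_cases h8 : s = "js-signature"; · subst h8; decide
  by_cases h9 : s = "fingerprint-required"; · subst h9; decide
  by_cases h10 : s = "empty-or-script-shell"; · subst h10; decide
  simp [pvPrio, PySem.Dict.getD_eq_get?_getD, PySem.Dict.get?,
        h1, h2, h3, h4, h5, h6, h7, h8, h9, h10, Ne.symm h1, Ne.symm h2, Ne.symm h3, Ne.symm h4,
        Ne.symm h5, Ne.symm h6, Ne.symm h7, Ne.symm h8, Ne.symm h9, Ne.symm h10]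

-- the rank of a signal list, phrased as A's branch structure computes it
def pvCls (l : List String) : Int :=
  if (l.any (fun s => ["captcha", "slider-captcha", "auth-required", "request-blocked"].contains s)) then 3
  else if (l.any (fun s => ["managed-browser-challenge", "waf-vendor", "risk-control", "js-signature",
                            "fingerprint-required", "empty-or-script-shell"].contains s)) then 2
  else if !l.isEmpty then 1 else 0

lemma pvCls_nonneg (l : List String) : 0 ≤ pvCls l := by
  unfold pvCls; split_ifs <;> norm_num

lemma pvCls_cons (s : String) (l : List String) :
    pvCls (s :: l) = max (PySem.Dict.getD pvPrio s 1) (pvCls l) := by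
  rw [prio_eq]
  simp only [pvCls, List.any_cons, List.isEmpty_cons, Bool.not_false, if_true]
  cases hH : (["captcha", "slider-captcha", "auth-required", "request-blocked"].contains s) <;>
  cases hM : (["managed-browser-challenge", "waf-vendor", "risk-control", "js-signature",
               "fingerprint-required", "empty-or-script-shell"].contains s) <;>
  cases hA : (l.any (fun s => ["captcha", "slider-captcha", "auth-required", "request-blocked"].contains s)) <;>
  cases hB : (l.any (fun s => ["managed-browser-challenge", "waf-vendor", "risk-control", "js-signature",
               "fingerprint-required", "empty-or-script-shell"].contains s)) <;>
  cases hE : l.isEmpty <;>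
  simp_all

-- B's fold computes max r (pvCls l)
lemma foldl_rank (l : List String) (r : Int) (hr : 0 ≤ r) :
    l.foldl (fun r s => max r (PySem.Dict.getD pvPrio s 1)) r = max r (pvCls l) := by
  induction l generalizing r with
  | nil => show r = max r (pvCls []); unfold pvCls; simp [hr]
  | cons s l ih =>
    simp only [List.foldl_cons]
    rw [ih (max r (PySem.Dict.getD pvPrio s 1)) (le_max_of_le_left hr), pvCls_cons]
    exact max_assoc r _ _

-- A scans the known names for membership in signals; pvCls scans signals for membership in the names
lemma any_swap (l₁ l₂ : List String) :
    l₁.any (fun s => l₂.contains s) = l₂.any (fun s => l₁.contains s) := by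
  rw [Bool.eq_iff_iff]
  simp only [List.any_eq_true, List.contains_iff_mem]
  constructor <;> rintro ⟨a, h1, h2⟩ <;> exact ⟨a, h2, h1⟩

-- ===== VERDICT (by name: the statement is the Claim_ definition above) =====
theorem level_for_py_spec : Claim_equal_level_for_py := by
  intro status_code signals _
  unfold Spec_level_for_py level_for_py level_for_py_alt
  rw [foldl_rank signals 0 le_rfl,
      max_eq_right (pvCls_nonneg signals),
      any_swap (l₂ := signals), any_swap (l₂ := signals)]
  unfold pvCls
  cases hS : (status_code == 401 || status_code == 403 || status_code == 429) <;>
  cases hA : (signals.any (fun s => ["captcha", "slider-captcha", "auth-required", "request-blocked"].contains s)) <;>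
  cases hB : (signals.any (fun s => ["managed-browser-challenge", "waf-vendor", "risk-control", "js-signature",
               "fingerprint-required", "empty-or-script-shell"].contains s)) <;>
  cases hE : signals.isEmpty <;>
  simp_all <;> rfl
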